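-- pv_equiv track=rewrite | github.com/AdamOtto/Daily-Challenges | Challenge1082.py | Check
-- ===== SOURCE A (Python) =====
-- def Check(board, x, y, dx, dy, player):
--     #xx = x + dx
--     #yy = y + dy
--     if (x + dx < 0 or x + dx >= 6):
--         return 0
--     elif (y + dy < 0 or y + dy >= 7):
--         return 0
--     if board[x + dx][y + dy] == player:
--         return 1 + Check(board, x + dx, y + dy, dx, dy, player)
--     else:
--         return 0
-- ===== SOURCE B (Python) =====
-- def Check(board, x, y, dx, dy, player):
--     # Stage 1: collect the cell values along the ray, stopping at the box edge.
--     vals = []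
--     cx, cy = x + dx, y + dy
--     while 0 <= cx < 6 and 0 <= cy < 7:
--         vals.append(board[cx][cy])
--         cx += dx
--         cy += dy
--     # Stage 2: count the leading run of cells equal to player.
--     count = 0
--     for v in vals:
--         if v != player:
--             break
--         count += 1
--     return count
-- ===== Notes on version B (the rewrite author's own statement) =====
-- stated objective: alternative
-- what changed: Replaces the recursive descent with two staged passes: first collect the cell values along the (dx,dy) ray until it leaves the 6x7 box, then count the leading run equal to player.
-- outside the precondition, e.g. on Check([[1, 2]], 0, 0, 0, 1, 1): A returns 0, B raises IndexError
import Mathlib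
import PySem

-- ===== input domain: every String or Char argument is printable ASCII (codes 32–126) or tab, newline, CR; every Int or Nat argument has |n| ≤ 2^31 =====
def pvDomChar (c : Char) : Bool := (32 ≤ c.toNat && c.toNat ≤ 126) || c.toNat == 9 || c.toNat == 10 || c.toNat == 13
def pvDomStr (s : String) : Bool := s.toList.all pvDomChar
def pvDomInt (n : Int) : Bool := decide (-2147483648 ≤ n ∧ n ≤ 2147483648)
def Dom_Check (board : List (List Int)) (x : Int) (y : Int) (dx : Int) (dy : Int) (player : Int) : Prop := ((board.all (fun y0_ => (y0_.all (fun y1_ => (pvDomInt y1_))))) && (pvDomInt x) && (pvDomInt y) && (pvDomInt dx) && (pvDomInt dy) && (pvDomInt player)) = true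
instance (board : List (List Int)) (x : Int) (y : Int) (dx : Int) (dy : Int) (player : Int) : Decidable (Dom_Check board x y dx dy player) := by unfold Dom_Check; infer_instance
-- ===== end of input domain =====

-- B replaces A's recursion with two staged passes: collect the ray's cells, then count the
-- matching prefix (same values on Pre_; objective: alternative algorithm, not faster).


-- ===== PORT A =====
-- Port of A: the recursive Check, with a fuel guard (50) that only makes the recursion
-- total; under Pre_Check (nonzero direction in the 6x7 box) it exits within 8 steps.
def CheckGo (board : List (List Int)) (dx dy player : Int) : Nat → Int → Int → Int
  | 0, _, _ => 0
  | n+1, x, y =>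
    if x + dx < 0 ∨ x + dx ≥ 6 then 0
    else if y + dy < 0 ∨ y + dy ≥ 7 then 0
    else
      match PySem.List.pyGet? board (x + dx) with
      | none => 0  -- Python raises IndexError here; excluded by Pre_Check
      | some row =>
        match PySem.List.pyGet? row (y + dy) with
        | none => 0  -- Python raises IndexError here; excluded by Pre_Check
        | some v =>
          if v = player then 1 + CheckGo board dx dy player n (x + dx) (y + dy) else 0

def Check (board : List (List Int)) (x : Int) (y : Int) (dx : Int) (dy : Int) (player : Int) : Int :=
  CheckGo board dx dy player 50 x y

-- ===== PORT B =====
-- Stage 1 of B: the while-loop collecting the ray's cell values, same fuel guard.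
def CheckCells (board : List (List Int)) (dx dy : Int) : Nat → Int → Int → List Int
  | 0, _, _ => []
  | n+1, cx, cy =>
    if 0 ≤ cx ∧ cx < 6 ∧ 0 ≤ cy ∧ cy < 7 then
      match PySem.List.pyGet? board cx with
      | none => []  -- Python raises IndexError here; excluded by Pre_Check
      | some row =>
        match PySem.List.pyGet? row cy with
        | none => []  -- Python raises IndexError here; excluded by Pre_Check
        | some v => v :: CheckCells board dx dy n (cx + dx) (cy + dy)
    else []

-- Stage 2 of B: the for-loop counting the leading run equal to player.
def CheckPrefix (player : Int) : List Int → Int → Int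
  | [], count => count
  | v :: rest, count => if v ≠ player then count else CheckPrefix player rest (count + 1)

def Check_alt (board : List (List Int)) (x : Int) (y : Int) (dx : Int) (dy : Int) (player : Int) : Int :=
  CheckPrefix player (CheckCells board dx dy 50 (x + dx) (y + dy)) 0

-- ===== PRECONDITION & SPEC =====
-- Pre_Check admits every input whose first step already leaves the 6x7 box (A returns 0
-- without indexing), and otherwise requires a full 6x7-or-larger board with a nonzero
-- direction: it excludes (a) dx = dy = 0 with an in-box first step, on which Python A recurses
-- forever (RecursionError) whenever the cell matches, and (b) undersized boards with an in-box
-- first step, on which A can raise IndexError; on some such excluded inputs A still returns 0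
-- (the walk exits or mismatches before reaching a missing cell) -- see cites.
def Pre_Check (board : List (List Int)) (x : Int) (y : Int) (dx : Int) (dy : Int) (player : Int) : Prop :=
  (x + dx < 0 ∨ 6 ≤ x + dx ∨ y + dy < 0 ∨ 7 ≤ y + dy) ∨
  (6 ≤ board.length ∧ (∀ row ∈ board, 7 ≤ row.length) ∧ (dx ≠ 0 ∨ dy ≠ 0))
instance (board : List (List Int)) (x : Int) (y : Int) (dx : Int) (dy : Int) (player : Int) : Decidable (Pre_Check board x y dx dy player) := by unfold Pre_Check; infer_instance
def pvWitness_Check : List (List Int) × Int × Int × Int × Int × Int :=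
  ([[1,1,0,0,0,0,0],[0,1,0,0,0,0,0],[0,0,1,0,0,0,0],[0,0,0,1,0,0,0],[0,0,0,0,0,0,0],[0,0,0,0,0,0,0]], -1, -1, 1, 1, 1)
def Spec_Check (board : List (List Int)) (x : Int) (y : Int) (dx : Int) (dy : Int) (player : Int) (out : Int) : Prop := out = Check_alt board x y dx dy player
instance (board : List (List Int)) (x : Int) (y : Int) (dx : Int) (dy : Int) (player : Int) (out : Int) : Decidable (Spec_Check board x y dx dy player out) := by unfold Spec_Check; infer_instance

-- ===== CLAIM (what is proved, stated in full; the proofs are below) =====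
def Claim_equal_Check : Prop := ∀ (board : List (List Int)) (x : Int) (y : Int) (dx : Int) (dy : Int) (player : Int), Dom_Check board x y dx dy player → Pre_Check board x y dx dy player → Spec_Check board x y dx dy player (Check board x y dx dy player)

-- ===== LEMMAS AND PROOFS =====
-- The prefix counter with accumulator c computes c plus its value with accumulator 0.
theorem checkPrefix_acc (player : Int) :
    ∀ (l : List Int) (c : Int), CheckPrefix player l c = c + CheckPrefix player l 0 := by
  intro l
  induction l with
  | nil => intro c; simp [CheckPrefix]
  | cons v rest ih =>
    intro c
    simp only [CheckPrefix]
    by_cases hv : v = player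
    · simp [hv, ih (c + 1), ih 1]; ring
    · simp [hv]

-- Counting from 0 on a list headed by player itself is one more than on its tail.
theorem checkPrefix_cons_self (p : Int) (l : List Int) :
    CheckPrefix p (p :: l) 0 = 1 + CheckPrefix p l 0 := by
  simp only [CheckPrefix]
  rw [if_neg (by simp), checkPrefix_acc]
  norm_num

-- A's recursion, fuel for fuel, equals counting the matching prefix of the collected cells.
theorem checkGo_eq_prefix (board : List (List Int)) (dx dy player : Int) :
    ∀ (n : Nat) (x y : Int),
      CheckGo board dx dy player n x y
        = CheckPrefix player (CheckCells board dx dy n (x + dx) (y + dy)) 0 := by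
  intro n
  induction n with
  | zero => intro x y; simp [CheckGo, CheckCells, CheckPrefix]
  | succ n ih =>
    intro x y
    simp only [CheckGo, CheckCells]
    by_cases hbox : 0 ≤ x + dx ∧ x + dx < 6 ∧ 0 ≤ y + dy ∧ y + dy < 7
    · have h1 : ¬ (x + dx < 0 ∨ x + dx ≥ 6) := by omega
      have h2 : ¬ (y + dy < 0 ∨ y + dy ≥ 7) := by omega
      simp only [if_neg h1, if_neg h2, if_pos hbox]
      cases hb : PySem.List.pyGet? board (x + dx) with
      | none => simp [CheckPrefix]
      | some row =>
        cases hr : PySem.List.pyGet? row (y + dy) with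
        | none => simp [hr, CheckPrefix]
        | some v =>
          by_cases hv : v = player
          · subst hv
            simp only [hr]
            rw [checkPrefix_cons_self, ih]
            simp
          · simp [hr, hv, CheckPrefix]
    · have : (x + dx < 0 ∨ x + dx ≥ 6) ∨ (y + dy < 0 ∨ y + dy ≥ 7) := by omega
      rcases this with h | h
      · simp only [if_pos h, if_neg hbox, CheckPrefix]
      · by_cases h1 : x + dx < 0 ∨ x + dx ≥ 6
        · simp only [if_pos h1, if_neg hbox, CheckPrefix]
        · simp only [if_neg h1, if_pos h, if_neg hbox, CheckPrefix]

-- ===== VERDICT (by name: the statement is the Claim_ definition above) =====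
theorem Check_spec : Claim_equal_Check := by
  intro board x y dx dy player _ _
  unfold Spec_Check Check Check_alt
  exact checkGo_eq_prefix board dx dy player 50 x y
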